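-- pv_equiv track=rewrite | github.com/Llera1904/Python | Teoria Computacional/AutomataProtocolo.py | paridadCadena
-- ===== SOURCE A (Python) =====
-- def paridadCadena(cadena):
--     cadenaAceptada = False
--     state = 0
--
--     for caracter in cadena:
--         if state == 0:
--             if caracter == '0':
--                 state = 2
--             elif caracter == '1':
--                 state = 1
--
--         elif state == 1:
--             if caracter == '0':
--                 state = 3
--             elif caracter == '1':
--                 state = 0
--
--         elif state == 2:
--             if caracter == '0':
--                 state = 0
--             elif caracter == '1':
--                 state = 3
--
--         elif state == 3:
--             if caracter == '0':
--                 state = 1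
--             elif caracter == '1':
--                 state = 2
--
--     if state == 0:
--         cadenaAceptada = True
--
--     return cadenaAceptada
-- ===== SOURCE B (Python) =====
-- def paridadCadena(cadena):
--     return cadena.count('0') % 2 == 0 and cadena.count('1') % 2 == 0
-- ===== Notes on version B (the rewrite author's own statement) =====
-- stated objective: simpler
-- what changed: Replaces the 4-state DFA traversal with str.count-based parity checks: accept iff the counts of the two digit characters are both even (C-level counting instead of a per-character Python loop).
import Mathlib
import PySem

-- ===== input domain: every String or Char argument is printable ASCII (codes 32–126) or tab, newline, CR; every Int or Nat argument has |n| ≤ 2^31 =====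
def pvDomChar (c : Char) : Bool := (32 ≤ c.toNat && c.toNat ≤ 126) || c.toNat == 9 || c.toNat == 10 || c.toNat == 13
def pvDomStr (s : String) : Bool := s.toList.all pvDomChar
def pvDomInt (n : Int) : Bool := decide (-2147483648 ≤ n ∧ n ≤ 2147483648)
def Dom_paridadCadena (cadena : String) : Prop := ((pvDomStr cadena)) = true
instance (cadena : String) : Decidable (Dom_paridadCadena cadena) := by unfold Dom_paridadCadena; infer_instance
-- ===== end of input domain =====

-- B replaces A's 4-state DFA loop by counting '0's and '1's and checking both counts are even (objective: simpler).

-- ===== PORT A =====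
-- one iteration of A's for-loop: the DFA transition, branches in A's order
def pvStepA (state : Nat) (caracter : Char) : Nat :=
  if state = 0 then
    (if caracter = '0' then 2 else if caracter = '1' then 1 else state)
  else if state = 1 then
    (if caracter = '0' then 3 else if caracter = '1' then 0 else state)
  else if state = 2 then
    (if caracter = '0' then 0 else if caracter = '1' then 3 else state)
  else if state = 3 then
    (if caracter = '0' then 1 else if caracter = '1' then 2 else state)
  else state

def paridadCadena (cadena : String) : Bool :=
  -- cadenaAceptada = False; state = 0; loop; if state == 0: cadenaAceptada = True
  let state := cadena.toList.foldl pvStepA 0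
  if state = 0 then true else false

-- ===== PORT B =====
def paridadCadena_alt (cadena : String) : Bool :=
  -- cadena.count('0') / cadena.count('1'): for a single-character substring this is the character count
  cadena.toList.count '0' % 2 == 0 && cadena.toList.count '1' % 2 == 0

-- ===== PRECONDITION & SPEC =====
def Spec_paridadCadena (cadena : String) (out : Bool) : Prop := out = paridadCadena_alt cadena
instance (cadena : String) (out : Bool) : Decidable (Spec_paridadCadena cadena out) := by unfold Spec_paridadCadena; infer_instance

-- ===== CLAIM (what is proved, stated in full; the proofs are below) =====
def Claim_equal_paridadCadena : Prop := ∀ (cadena : String), Dom_paridadCadena cadena → Spec_paridadCadena cadena (paridadCadena cadena)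

-- ===== LEMMAS AND PROOFS =====

-- state encoding: (parity of '0's seen, parity of '1's seen) ↦ DFA state
def pvEnc (z o : Bool) : Nat :=
  if z then (if o then 3 else 2) else (if o then 1 else 0)

theorem pvStepA_enc (z o : Bool) (c : Char) :
    pvStepA (pvEnc z o) c =
      pvEnc (xor z (c = '0')) (xor o (c = '1')) := by
  cases z <;> cases o <;>
    by_cases h0 : c = '0' <;> by_cases h1 : c = '1' <;>
      simp_all [pvEnc, pvStepA]

theorem pvParitySucc (n : Nat) : ((n + 1) % 2 == 1) = !(n % 2 == 1) := by
  rcases Nat.mod_two_eq_zero_or_one n with h | h <;> simp [Nat.add_mod, h]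

theorem pvFoldA_enc (l : List Char) (z o : Bool) :
    l.foldl pvStepA (pvEnc z o) =
      pvEnc (xor z (l.count '0' % 2 == 1)) (xor o (l.count '1' % 2 == 1)) := by
  induction l generalizing z o with
  | nil => simp
  | cons c t ih =>
    simp only [List.foldl_cons, pvStepA_enc, ih]
    congr 1
    · cases z <;> by_cases h : c = '0' <;>
        simp [h, pvParitySucc]
    · cases o <;> by_cases h : c = '1' <;>
        simp [h, pvParitySucc]

-- ===== VERDICT (by name: the statement is the Claim_ definition above) =====
theorem paridadCadena_spec : Claim_equal_paridadCadena := by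
  intro cadena _
  unfold Spec_paridadCadena paridadCadena paridadCadena_alt
  have h := pvFoldA_enc cadena.toList false false
  simp only [Bool.false_xor, show pvEnc false false = 0 from rfl] at h
  rw [h]
  rcases Nat.mod_two_eq_zero_or_one (cadena.toList.count '0') with h0 | h0 <;>
    rcases Nat.mod_two_eq_zero_or_one (cadena.toList.count '1') with h1 | h1 <;>
      simp [pvEnc, h0, h1]
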